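-- pv_equiv track=rewrite | github.com/fdebrus/Nikobus-HA | custom_components/nikobus/helpers.py | calc_crc2
-- ===== SOURCE A (Python) =====
-- def calc_crc2(data):
--     crc = 0
--     for char in data:
--         crc ^= ord(char)
--         for _ in range(8):
--             if (crc & 0xFF) >> 7 != 0:
--                 crc = crc << 1
--                 crc ^= 0x99
--             else:
--                 crc = crc << 1
--     return crc & 0xFF
-- ===== SOURCE B (Python) =====
-- def _build_table():
--     table = []
--     for b in range(256):
--         c = b
--         for _ in range(8):
--             if (c & 0xFF) >> 7 != 0:
--                 c = (c << 1) ^ 0x99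
--             else:
--                 c = c << 1
--         table.append(c & 0xFF)
--     return table
--
-- _CRC_TABLE = _build_table()
--
-- def calc_crc2(data):
--     crc = 0
--     for char in data:
--         crc = _CRC_TABLE[(crc ^ ord(char)) & 0xFF]
--     return crc
-- ===== Notes on version B (the rewrite author's own statement) =====
-- stated objective: faster
-- what changed: Replaces A's per-character 8-iteration shift/XOR-0x99 loop with a 256-entry CRC table precomputed once, so each character costs a single masked table lookup.
import Mathlib
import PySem

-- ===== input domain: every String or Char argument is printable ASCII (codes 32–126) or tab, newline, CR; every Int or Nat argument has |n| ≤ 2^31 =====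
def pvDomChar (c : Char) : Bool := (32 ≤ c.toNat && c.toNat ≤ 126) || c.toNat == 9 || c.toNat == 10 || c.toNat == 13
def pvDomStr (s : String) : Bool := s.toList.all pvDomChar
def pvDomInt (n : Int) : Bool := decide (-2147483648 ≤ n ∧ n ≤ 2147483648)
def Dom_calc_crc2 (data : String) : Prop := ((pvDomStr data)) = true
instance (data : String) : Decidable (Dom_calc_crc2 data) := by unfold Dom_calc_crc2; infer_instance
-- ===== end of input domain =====

-- B replaces A's per-character 8-iteration shift/XOR loop by a 256-entry table built once, giving a single table lookup per character (objective: faster).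

-- ===== PORT A =====
-- one round of A's inner `for _ in range(8)` body
def pvRoundA (crc : Int) : Int :=
  if Int.shiftRight (Int.land crc 255) 7 ≠ 0 then
    Int.xor (Int.shiftLeft crc 1) 153
  else
    Int.shiftLeft crc 1

def calc_crc2 (data : String) : Int :=
  Int.land
    (data.toList.foldl
      (fun crc ch =>
        (List.range 8).foldl (fun c _ => pvRoundA c) (Int.xor crc (ch.toNat : Int)))
      0)
    255

-- ===== PORT B =====
-- table entry for byte value b: the same 8-round feedback loop, masked to 8 bits
def pvTableEntry (b : Int) : Int :=
  Int.land
    ((List.range 8).foldl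
      (fun c _ =>
        if Int.shiftRight (Int.land c 255) 7 ≠ 0 then
          Int.xor (Int.shiftLeft c 1) 153
        else
          Int.shiftLeft c 1)
      b)
    255

def pvCrcTable : List Int := (List.range 256).map (fun (b : Nat) => pvTableEntry (b : Int))

def calc_crc2_alt (data : String) : Int :=
  data.toList.foldl
    (fun crc ch => pvCrcTable.getD (Int.land (Int.xor crc (ch.toNat : Int)) 255).toNat 0)
    0

-- ===== PRECONDITION & SPEC =====
def Spec_calc_crc2 (data : String) (out : Int) : Prop := out = calc_crc2_alt data
instance (data : String) (out : Int) : Decidable (Spec_calc_crc2 data out) := by unfold Spec_calc_crc2; infer_instance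

-- ===== CLAIM (what is proved, stated in full; the proofs are below) =====
def Claim_equal_calc_crc2 : Prop := ∀ (data : String), Dom_calc_crc2 data → Spec_calc_crc2 data (calc_crc2 data)

-- ===== LEMMAS AND PROOFS =====

-- Nat-level mirror of one round
def natRound (c : Nat) : Nat :=
  if (c &&& 255) >>> 7 ≠ 0 then (c <<< 1) ^^^ 153 else c <<< 1

def natInner (c : Nat) : Nat := (List.range 8).foldl (fun x _ => natRound x) c

lemma and255 (a : Nat) : a &&& 255 = a % 256 := by
  have h := Nat.and_two_pow_sub_one_eq_mod a 8
  norm_num at h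
  exact h

lemma xorMod {a b : Nat} (c : Nat) (h : a % 256 = b % 256) :
    (a ^^^ c) % 256 = (b ^^^ c) % 256 := by
  rw [← and255, ← and255, Nat.and_xor_distrib_right, Nat.and_xor_distrib_right,
      and255 a, and255 b, h]

lemma roundMod {a b : Nat} (h : a % 256 = b % 256) : natRound a % 256 = natRound b % 256 := by
  unfold natRound
  rw [and255, and255, h]
  have h2 : (a <<< 1) % 256 = (b <<< 1) % 256 := by
    simp only [Nat.shiftLeft_eq, pow_one]
    omega
  split
  · exact xorMod 153 h2
  · exact h2

lemma innerFoldMod : ∀ (l : List Nat) {a b : Nat}, a % 256 = b % 256 →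
    (l.foldl (fun x _ => natRound x) a) % 256 = (l.foldl (fun x _ => natRound x) b) % 256 := by
  intro l
  induction l with
  | nil => intro a b h; exact h
  | cons x xs ih => intro a b h; exact ih (roundMod h)

lemma castRound (c : Nat) : pvRoundA (c : Int) = ((natRound c : Nat) : Int) := by
  unfold pvRoundA natRound
  have hland : Int.land (c : Int) 255 = ((c &&& 255 : Nat) : Int) := rfl
  have hsr : Int.shiftRight ((c &&& 255 : Nat) : Int) 7 = (((c &&& 255) >>> 7 : Nat) : Int) := rfl
  have hsl : Int.shiftLeft (c : Int) 1 = ((c <<< 1 : Nat) : Int) := rfl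
  have hxor : Int.xor ((c <<< 1 : Nat) : Int) 153 = (((c <<< 1) ^^^ 153 : Nat) : Int) := rfl
  rw [hland, hsr, hsl]
  by_cases h : (c &&& 255) >>> 7 = 0
  · rw [h]; simp
  · rw [if_pos (by exact_mod_cast h), if_pos h]; exact hxor

lemma castInner : ∀ (l : List Nat) (c : Nat),
    l.foldl (fun x _ => pvRoundA x) (c : Int) = ((l.foldl (fun x _ => natRound x) c : Nat) : Int) := by
  intro l
  induction l with
  | nil => intro c; rfl
  | cons x xs ih => intro c; simp only [List.foldl_cons, castRound]; exact ih _

lemma tableEntry_eq (m : Nat) : pvTableEntry (m : Int) = ((natInner m &&& 255 : Nat) : Int) := by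
  show Int.land ((List.range 8).foldl (fun x _ => pvRoundA x) (m : Int)) 255 = _
  rw [castInner]
  rfl

lemma tableGetD (j : Nat) (h : j < 256) : pvCrcTable.getD j 0 = pvTableEntry (j : Int) := by
  unfold pvCrcTable
  rw [List.getD_eq_getElem?_getD, List.getElem?_map, List.getElem?_range h]
  rfl

lemma foldCongr : ∀ (l : List Char) {a b : Nat}, a % 256 = b % 256 →
    (l.foldl (fun c ch => natInner (c ^^^ ch.toNat)) a) % 256
      = (l.foldl (fun c ch => natInner (c ^^^ ch.toNat)) b) % 256 := by
  intro l
  induction l with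
  | nil => intro a b h; exact h
  | cons ch xs ih =>
      intro a b h
      exact ih (innerFoldMod (List.range 8) (xorMod ch.toNat h))

lemma bStep (y ch : Nat) :
    pvCrcTable.getD (Int.land (Int.xor (y : Int) (ch : Int)) 255).toNat 0
      = ((natInner ((y ^^^ ch) % 256) % 256 : Nat) : Int) := by
  have h1 : Int.land (Int.xor (y : Int) (ch : Int)) 255 = (((y ^^^ ch) &&& 255 : Nat) : Int) := rfl
  rw [h1, Int.toNat_natCast]
  have hlt : (y ^^^ ch) &&& 255 < 256 := by
    have := Nat.and_le_right (n := y ^^^ ch) (m := 255)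
    omega
  rw [tableGetD _ hlt, tableEntry_eq, and255, and255]

lemma mainFold : ∀ (l : List Char) (a : Nat),
    l.foldl (fun crc ch => pvCrcTable.getD (Int.land (Int.xor crc (ch.toNat : Int)) 255).toNat 0)
        ((a % 256 : Nat) : Int)
      = ((l.foldl (fun c ch => natInner (c ^^^ ch.toNat)) a) % 256 : Nat) := by
  intro l
  induction l with
  | nil => intro a; rfl
  | cons ch xs ih =>
      intro a
      simp only [List.foldl_cons]
      rw [bStep (a % 256) ch.toNat]
      have hx : natInner ((a % 256 ^^^ ch.toNat) % 256) % 256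
          = natInner (a ^^^ ch.toNat) % 256 := by
        apply innerFoldMod
        have h1 : (a % 256 ^^^ ch.toNat) % 256 % 256 = (a % 256 ^^^ ch.toNat) % 256 :=
          Nat.mod_mod_of_dvd _ dvd_rfl
        rw [h1]
        exact xorMod ch.toNat (Nat.mod_mod_of_dvd a dvd_rfl)
      rw [ih (natInner ((a % 256 ^^^ ch.toNat) % 256))]
      exact congrArg _ (foldCongr xs hx)

lemma castAFold : ∀ (l : List Char) (a : Nat),
    l.foldl (fun crc ch => (List.range 8).foldl (fun c _ => pvRoundA c) (Int.xor crc (ch.toNat : Int))) (a : Int)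
      = ((l.foldl (fun c ch => natInner (c ^^^ ch.toNat)) a : Nat) : Int) := by
  intro l
  induction l with
  | nil => intro a; rfl
  | cons ch xs ih =>
      intro a
      simp only [List.foldl_cons]
      have hx : Int.xor (a : Int) (ch.toNat : Int) = ((a ^^^ ch.toNat : Nat) : Int) := rfl
      rw [hx, castInner]
      exact ih _

-- ===== VERDICT (by name: the statement is the Claim_ definition above) =====
lemma landCast (m : Nat) : Int.land (m : Int) 255 = ((m % 256 : Nat) : Int) := by
  rw [← and255]; rfl

theorem calc_crc2_spec : Claim_equal_calc_crc2 := by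
  intro data _
  have ha := castAFold data.toList 0
  have hb := mainFold data.toList 0
  simp only [Nat.zero_mod, Nat.cast_zero] at ha hb
  unfold Spec_calc_crc2 calc_crc2 calc_crc2_alt
  rw [ha, hb, landCast]
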